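-- pv_equiv track=rewrite | github.com/minorthreat85/PitBox-Replit | agent/server_cfg_sync.py | _parse_race_ini_to_sections
-- ===== SOURCE A (Python) =====
-- def _parse_race_ini_to_sections(text: str) -> list[tuple[str, list[tuple[str, str]]]]:
--     """
--     Parse race.ini text into ordered list of (section_name_upper, [(key_orig, value), ...]).
--     Preserves section order, key order, and original key strings for patching.
--     """
--     sections: list[tuple[str, list[tuple[str, str]]]] = []
--     current: list[tuple[str, str]] = []
--     section_name = ""
--     for line in (text or "").splitlines():
--         stripped = line.strip()
--         if stripped.startswith("[") and stripped.endswith("]"):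
--             if section_name or current:
--                 sections.append((section_name, current))
--             section_name = stripped[1:-1].strip().upper()
--             current = []
--             continue
--         if section_name and "=" in stripped:
--             key, _, val = stripped.partition("=")
--             key_orig = key.strip()
--             if key_orig:
--                 current.append((key_orig, val.strip()))
--     if section_name or current:
--         sections.append((section_name, current))
--     return sections
-- ===== SOURCE B (Python) =====
-- def _header_name(line):
--     s = line.strip()
--     if s.startswith("[") and s.endswith("]"):
--         return s[1:-1].strip().upper()
--     return None
--
--
-- def _kv(line):
--     s = line.strip()
--     if "=" in s:
--         k, _, v = s.partition("=")
--         if k.strip():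
--             return (k.strip(), v.strip())
--     return None
--
--
-- def _parse_race_ini_to_sections(text):
--     lines = (text or "").splitlines()
--     out = []
--     i, n = 0, len(lines)
--     while i < n:
--         name = _header_name(lines[i])
--         i += 1
--         if name is None:
--             continue
--         start = i
--         while i < n and _header_name(lines[i]) is None:
--             i += 1
--         if name:
--             out.append((name, [kv for kv in map(_kv, lines[start:i]) if kv is not None]))
--     return out
-- ===== Notes on version B (the rewrite author's own statement) =====
-- stated objective: alternative
-- what changed: Replaced A's single stateful accumulator loop (pending section name/current pair list with flush-on-header and a final flush) by a two-level segmentation: an outer scan that finds each header, an inner scan that collects that header's body lines, and a per-section comprehension extracting key-value pairs, with no pending/flush state.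
import Mathlib
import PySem

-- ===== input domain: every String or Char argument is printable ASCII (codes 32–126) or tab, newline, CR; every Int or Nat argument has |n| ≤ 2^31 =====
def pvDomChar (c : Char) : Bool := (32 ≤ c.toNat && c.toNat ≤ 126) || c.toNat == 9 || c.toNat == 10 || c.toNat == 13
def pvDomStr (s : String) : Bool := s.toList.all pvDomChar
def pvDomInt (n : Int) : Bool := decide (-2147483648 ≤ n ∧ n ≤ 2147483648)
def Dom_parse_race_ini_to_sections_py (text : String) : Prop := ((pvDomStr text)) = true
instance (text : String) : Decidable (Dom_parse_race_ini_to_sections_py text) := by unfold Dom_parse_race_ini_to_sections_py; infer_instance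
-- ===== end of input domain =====

-- B replaces A's single stateful accumulator loop (pending section name/current list, flush-on-header)
-- by a two-level segment structure: an outer scan over headers with an inner body scan per section
-- (objective: alternative decomposition, same linear cost).
-- shared primitive: s.partition('='), restricted to the (before, after) components
-- (exact: Python returns (s, '', '') when '=' is absent, i.e. before = s, after = '')
def pvPartitionEq (s : String) : String × String :=
  if PySem.Str.find s "=" = -1 then (s, "")
  else (PySem.Str.slice s none (some (PySem.Str.find s "=")),
        PySem.Str.slice s (some (PySem.Str.find s "=" + 1)) none)

-- Python's `stripped.startswith("[") and stripped.endswith("]")` of the stripped line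
def pvIsHeader (line : String) : Bool :=
  PySem.Str.startswith (PySem.Str.strip line) "[" && PySem.Str.endswith (PySem.Str.strip line) "]"

-- Python's `stripped[1:-1].strip().upper()` of the stripped line
def pvName (line : String) : String :=
  PySem.Str.upper (PySem.Str.strip (PySem.Str.slice (PySem.Str.strip line) (some 1) (some (-1))))

-- ===== PORT A =====
-- loop body of A's for-loop; state = (sections, current, section_name)
def pvStepA (st : List (String × List (String × String)) × List (String × String) × String)
    (line : String) : List (String × List (String × String)) × List (String × String) × String :=
  if pvIsHeader line = true then
    ((if st.2.2 ≠ "" ∨ st.2.1 ≠ [] then st.1 ++ [(st.2.2, st.2.1)] else st.1), [], pvName line)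
  else if st.2.2 ≠ "" ∧ PySem.Str.isIn "=" (PySem.Str.strip line) = true then
    (if PySem.Str.strip (pvPartitionEq (PySem.Str.strip line)).1 ≠ "" then
      (st.1,
       st.2.1 ++ [(PySem.Str.strip (pvPartitionEq (PySem.Str.strip line)).1,
                   PySem.Str.strip (pvPartitionEq (PySem.Str.strip line)).2)],
       st.2.2)
     else st)
  else st

def parse_race_ini_to_sections_py (text : String) : List (String × (List (String × String))) :=
  -- `(text or "")` equals `text` for a String argument
  let st := (PySem.Str.splitlines text).foldl pvStepA ([], [], "")
  if st.2.2 ≠ "" ∨ st.2.1 ≠ [] then st.1 ++ [(st.2.2, st.2.1)] else st.1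

-- ===== PORT B =====
-- _header_name: the upper-cased stripped name if the stripped line is a [..] header, else none
def pvHeaderName (line : String) : Option String :=
  if pvIsHeader line = true then some (pvName line) else none

-- _kv: the (key, value) pair a body line contributes, or none
def pvKV (line : String) : Option (String × String) :=
  if PySem.Str.isIn "=" (PySem.Str.strip line) = true then
    (if PySem.Str.strip (pvPartitionEq (PySem.Str.strip line)).1 ≠ "" then
      some (PySem.Str.strip (pvPartitionEq (PySem.Str.strip line)).1,
            PySem.Str.strip (pvPartitionEq (PySem.Str.strip line)).2)
     else none)
  else none

def pvNH (line : String) : Bool := (pvHeaderName line).isNone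

-- the outer while-loop of B: skip to a header, take its body (the inner while-loop),
-- emit the section if its name is non-empty, continue after the body
def pvParseB : List String → List (String × (List (String × String)))
  | [] => []
  | l :: ls =>
    match pvHeaderName l with
    | none => pvParseB ls
    | some name =>
      (if name ≠ "" then [(name, (ls.takeWhile pvNH).filterMap pvKV)] else [])
        ++ pvParseB (ls.dropWhile pvNH)
termination_by ls => ls.length
decreasing_by
  all_goals simp only [List.length_cons]
  · omega
  · exact Nat.lt_succ_of_le (List.length_dropWhile_le _ _)

def parse_race_ini_to_sections_py_alt (text : String) : List (String × (List (String × String))) :=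
  pvParseB (PySem.Str.splitlines text)

-- ===== PRECONDITION & SPEC =====
def Spec_parse_race_ini_to_sections_py (text : String) (out : List (String × (List (String × String)))) : Prop := out = parse_race_ini_to_sections_py_alt text
instance (text : String) (out : List (String × (List (String × String)))) : Decidable (Spec_parse_race_ini_to_sections_py text out) := by unfold Spec_parse_race_ini_to_sections_py; infer_instance

-- ===== CLAIM (what is proved, stated in full; the proofs are below) =====
def Claim_equal_parse_race_ini_to_sections_py : Prop := ∀ (text : String), Dom_parse_race_ini_to_sections_py text → Spec_parse_race_ini_to_sections_py text (parse_race_ini_to_sections_py text)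
lemma pvNH_false {l : String} (h : pvIsHeader l = true) : pvNH l = false := by
  simp [pvNH, pvHeaderName, h]

lemma pvNH_true {l : String} (h : pvIsHeader l = false) : pvNH l = true := by
  simp [pvNH, pvHeaderName, h]

lemma pvStepA_nonheader (st : List (String × List (String × String)) × List (String × String) × String)
    (l : String) (h : pvIsHeader l = false) (hn : st.2.2 ≠ "") :
    pvStepA st l = (st.1, st.2.1 ++ ((pvKV l).map (fun kv => [kv])).getD [], st.2.2) := by
  unfold pvStepA pvKV
  rw [if_neg (by simp [h])]
  by_cases hin : PySem.Str.isIn "=" (PySem.Str.strip l) = true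
  · rw [if_pos ⟨hn, hin⟩, if_pos hin]
    by_cases hk : PySem.Str.strip (pvPartitionEq (PySem.Str.strip l)).1 ≠ ""
    · rw [if_pos hk, if_pos hk]; rfl
    · rw [if_neg hk, if_neg hk]; simp
  · rw [if_neg (fun hc => hin hc.2), if_neg hin]; simp
lemma pvStepA_nonheader_noname (st : List (String × List (String × String)) × List (String × String) × String)
    (l : String) (h : pvIsHeader l = false) (hn : st.2.2 = "") :
    pvStepA st l = st := by
  unfold pvStepA
  rw [if_neg (by simp [h]), if_neg (fun hc => hc.1 hn)]

-- B skips non-header lines one at a time, so jumping over them at once changes nothing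
lemma pvParseB_dropWhile (ls : List String) : pvParseB (ls.dropWhile pvNH) = pvParseB ls := by
  induction ls with
  | nil => rfl
  | cons l ls ih =>
    rcases hb : pvIsHeader l with _ | _
    · rw [List.dropWhile_cons_of_pos (pvNH_true hb), ih, pvParseB]
      simp [pvHeaderName, hb]
    · rw [List.dropWhile_cons_of_neg (by simp [pvNH_false hb])]

lemma pvStepA_header (st : List (String × List (String × String)) × List (String × String) × String)
    (l : String) (h : pvIsHeader l = true) :
    pvStepA st l =
      ((if st.2.2 ≠ "" ∨ st.2.1 ≠ [] then st.1 ++ [(st.2.2, st.2.1)] else st.1), [], pvName l) := by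
  unfold pvStepA
  rw [if_pos h]

lemma pvParseB_cons_header (l : String) (ls : List String) (h : pvIsHeader l = true) :
    pvParseB (l :: ls) =
      (if pvName l ≠ "" then [(pvName l, (ls.takeWhile pvNH).filterMap pvKV)] else [])
        ++ pvParseB (ls.dropWhile pvNH) := by
  rw [pvParseB]
  simp [pvHeaderName, h]

-- A's trailing flush, as a function of the loop's final state
def pvFlush (st : List (String × List (String × String)) × List (String × String) × String) :
    List (String × (List (String × String))) :=
  if st.2.2 ≠ "" ∨ st.2.1 ≠ [] then st.1 ++ [(st.2.2, st.2.1)] else st.1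

-- MAIN INVARIANT: A's loop with final flush, over any suffix of lines and any reachable
-- state, produces the already-flushed sections followed by B's parse of that suffix
lemma pvMain (lines : List String) :
    ∀ (secs : List (String × List (String × String))) (cur : List (String × String))
      (name : String), (name = "" → cur = []) →
      pvFlush (lines.foldl pvStepA (secs, cur, name)) =
      secs ++ (if name = "" then pvParseB lines
               else (name, cur ++ (lines.takeWhile pvNH).filterMap pvKV)
                      :: pvParseB (lines.dropWhile pvNH)) := by
  induction lines with
  | nil =>
    intro secs cur name hnc
    by_cases hn : name = ""
    · rw [if_pos hn]
      unfold pvFlush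
      simp only [List.foldl_nil, hn, hnc hn, pvParseB]
      simp
    · rw [if_neg hn]
      unfold pvFlush
      simp only [List.foldl_nil, List.takeWhile_nil, List.filterMap_nil, List.append_nil,
        List.dropWhile_nil, pvParseB]
      rw [if_pos (Or.inl hn)]
  | cons l ls ih =>
    intro secs cur name hnc
    rw [List.foldl_cons]
    rcases hb : pvIsHeader l with _ | _
    · -- non-header line
      by_cases hn : name = ""
      · rw [pvStepA_nonheader_noname _ _ hb hn, ih secs cur name hnc]
        have hskip : pvParseB (l :: ls) = pvParseB ls := by
          rw [pvParseB]; simp [pvHeaderName, hb]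
        rw [if_pos hn, if_pos hn, hskip]
      · rw [pvStepA_nonheader _ _ hb hn,
          ih _ _ name (fun hc => absurd hc hn), if_neg hn, if_neg hn,
          List.takeWhile_cons_of_pos (pvNH_true hb), List.dropWhile_cons_of_pos (pvNH_true hb),
          List.filterMap_cons]
        rcases pvKV l with _ | kv <;> simp
    · -- header line
      by_cases hn : name = ""
      · rw [pvStepA_header _ _ hb,
          if_neg (fun hc => hc.elim (fun h1 => h1 hn) (fun h2 => h2 (hnc hn))),
          ih secs [] (pvName l) (fun _ => rfl), if_pos hn, pvParseB_cons_header l ls hb]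
        by_cases hn' : pvName l = ""
        · rw [if_pos hn', if_neg (fun hc => hc hn'), pvParseB_dropWhile]
          simp
        · rw [if_neg hn', if_pos hn']
          simp
      · rw [pvStepA_header _ _ hb, if_pos (Or.inl hn),
          ih (secs ++ [(name, cur)]) [] (pvName l) (fun _ => rfl), if_neg hn,
          List.takeWhile_cons_of_neg (by simp [pvNH_false hb]),
          List.dropWhile_cons_of_neg (by simp [pvNH_false hb]),
          pvParseB_cons_header l ls hb]
        by_cases hn' : pvName l = ""
        · rw [if_pos hn', if_neg (fun hc => hc hn'), pvParseB_dropWhile]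
          simp
        · rw [if_neg hn', if_pos hn']
          simp
-- ===== VERDICT (by name: the statement is the Claim_ definition above) =====
theorem parse_race_ini_to_sections_py_spec : Claim_equal_parse_race_ini_to_sections_py := by
  intro text _
  unfold Spec_parse_race_ini_to_sections_py parse_race_ini_to_sections_py parse_race_ini_to_sections_py_alt
  have h := pvMain (PySem.Str.splitlines text) [] [] "" (fun _ => rfl)
  rw [if_pos rfl] at h
  unfold pvFlush at h
  simpa using h
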